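-- pv_equiv track=rewrite | github.com/weiyangzen/awesome_algorithms | Algorithms/计算机-并行与分布式-0467-并行快速排序/demo.py | _expand_partitions
-- ===== SOURCE A (Python) =====
-- def _choose_pivot(values: list[int]) -> int:
--     """中位三数法选主元，降低极端输入下的不平衡概率."""
--     first = values[0]
--     middle = values[len(values) // 2]
--     last = values[-1]
--     trio = [first, middle, last]
--     trio.sort()
--     return trio[1]
--
-- def _partition_three_way(values: list[int], pivot: int) -> tuple[list[int], list[int], list[int]]:
--     """按 pivot 进行三路划分."""
--     less: list[int] = []
--     equal: list[int] = []
--     greater: list[int] = []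
--     for v in values:
--         if v < pivot:
--             less.append(v)
--         elif v > pivot:
--             greater.append(v)
--         else:
--             equal.append(v)
--     return less, equal, greater
--
-- def _expand_partitions(values: list[int], depth: int, min_partition_size: int) -> list[list[int]]:
--     """在主进程内按有限深度展开快排分区树，得到有序拼接顺序的子问题列表."""
--     n = len(values)
--     if n <= 1:
--         return [values[:]]
--     if depth <= 0 or n < min_partition_size:
--         return [values[:]]
--
--     pivot = _choose_pivot(values)
--     less, equal, greater = _partition_three_way(values, pivot)
--     if len(equal) == n:
--         return [equal]
--
--     partitions: list[list[int]] = []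
--     if less:
--         partitions.extend(_expand_partitions(less, depth - 1, min_partition_size))
--     if equal:
--         partitions.append(equal)
--     if greater:
--         partitions.extend(_expand_partitions(greater, depth - 1, min_partition_size))
--     return partitions
-- ===== SOURCE B (Python) =====
-- def _choose_pivot(values: list[int]) -> int:
--     first = values[0]
--     middle = values[len(values) // 2]
--     last = values[-1]
--     trio = [first, middle, last]
--     trio.sort()
--     return trio[1]
--
-- def _expand_partitions(values: list[int], depth: int, min_partition_size: int) -> list[list[int]]:
--     """Interval-based expansion: each tree node is an open value interval (lo, hi);
--     its sublist is the original list filtered to the interval (valid because the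
--     three-way partition is a stable filter by comparison with the pivot)."""
--     def go(lo, hi, d):
--         vs = [v for v in values
--               if (lo is None or lo < v) and (hi is None or v < hi)]
--         n = len(vs)
--         if n <= 1 or d <= 0 or n < min_partition_size:
--             return [vs]
--         pivot = _choose_pivot(vs)
--         equal = [v for v in vs if v == pivot]
--         if len(equal) == n:
--             return [equal]
--         out: list[list[int]] = []
--         if any(v < pivot for v in vs):
--             out.extend(go(lo, pivot, d - 1))
--         out.append(equal)
--         if any(v > pivot for v in vs):
--             out.extend(go(pivot, hi, d - 1))
--         return out
--     return go(None, None, depth)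
-- ===== Notes on version B (the rewrite author's own statement) =====
-- stated objective: alternative
-- what changed: Replaces recursion on materialized sublists with recursion on open value intervals (lo, hi): each node's sublist is re-derived by filtering the original list to the interval, exploiting that the three-way partition is a stable filter by comparison with the pivot.
import Mathlib
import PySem

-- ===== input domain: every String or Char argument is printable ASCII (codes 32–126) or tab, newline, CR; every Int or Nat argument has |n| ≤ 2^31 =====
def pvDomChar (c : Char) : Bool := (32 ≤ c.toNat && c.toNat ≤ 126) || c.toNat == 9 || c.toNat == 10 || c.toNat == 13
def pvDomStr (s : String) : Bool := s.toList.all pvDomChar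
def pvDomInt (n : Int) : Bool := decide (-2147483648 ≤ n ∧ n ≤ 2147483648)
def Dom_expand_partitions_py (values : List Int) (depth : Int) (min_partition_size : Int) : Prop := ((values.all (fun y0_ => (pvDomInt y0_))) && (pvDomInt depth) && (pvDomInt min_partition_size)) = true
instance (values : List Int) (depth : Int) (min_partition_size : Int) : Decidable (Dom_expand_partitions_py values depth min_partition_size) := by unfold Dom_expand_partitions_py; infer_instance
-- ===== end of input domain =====

-- B re-derives each partition-tree node as the original list filtered to an open value
-- interval (lo, hi) instead of recursing on materialized sublists (alternative decomposition).

-- ===== PORT A =====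
-- _choose_pivot; indexing ported with pyGetD (exact: every call site passes a nonempty list)
def choose_pivot (values : List Int) : Int :=
  let first := PySem.List.pyGetD values 0 0
  let middle := PySem.List.pyGetD values (PySem.Int.floordiv values.length 2) 0
  let last := PySem.List.pyGetD values (-1) 0
  let trio := PySem.List.sorted [first, middle, last] (fun x => x) false
  PySem.List.pyGetD trio 1 0

-- loop body of _partition_three_way
def part3_step (pivot : Int) (acc : List Int × List Int × List Int) (v : Int) :
    List Int × List Int × List Int :=
  if v < pivot then (acc.1 ++ [v], acc.2.1, acc.2.2)
  else if v > pivot then (acc.1, acc.2.1, acc.2.2 ++ [v])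
  else (acc.1, acc.2.1 ++ [v], acc.2.2)

def partition_three_way (values : List Int) (pivot : Int) :
    List Int × List Int × List Int :=
  values.foldl (part3_step pivot) ([], [], [])

-- facts the ports' termination cites by name
theorem part3_spec (values : List Int) (pivot : Int) :
    partition_three_way values pivot =
      (values.filter (fun v => decide (v < pivot)),
       values.filter (fun v => decide (v = pivot)),
       values.filter (fun v => decide (pivot < v))) := by
  suffices h : ∀ (l : List Int) (a b c : List Int),
      l.foldl (part3_step pivot) (a, b, c) =
        (a ++ l.filter (fun v => decide (v < pivot)),
         b ++ l.filter (fun v => decide (v = pivot)),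
         c ++ l.filter (fun v => decide (pivot < v))) by
    simpa using h values [] [] []
  intro l
  induction l with
  | nil => intro a b c; simp
  | cons v t ih =>
    intro a b c
    by_cases h1 : v < pivot
    · have hne : ¬ (v = pivot) := by omega
      have hng : ¬ (pivot < v) := by omega
      simp [part3_step, h1, hne, hng, ih]
    · by_cases h2 : pivot < v
      · have hne : ¬ (v = pivot) := by omega
        simp [part3_step, h1, h2, hne, ih]
      · have he : v = pivot := by omega
        simp [part3_step, h1, h2, he, ih]

theorem part3_len (values : List Int) (pivot : Int) :
    (partition_three_way values pivot).1.length +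
    (partition_three_way values pivot).2.1.length +
    (partition_three_way values pivot).2.2.length = values.length := by
  rw [part3_spec]
  induction values with
  | nil => simp
  | cons v t ih =>
    by_cases h1 : v < pivot
    · have hne : ¬ (v = pivot) := by omega
      have hng : ¬ (pivot < v) := by omega
      simp only [List.filter_cons, h1, hne, hng, decide_true, decide_false,
        List.length_cons, if_true, if_false] at *
      simp_all; omega
    · by_cases h2 : pivot < v
      · have hne : ¬ (v = pivot) := by omega
        simp only [List.filter_cons, h1, h2, hne, decide_true, decide_false] at *
        simp_all; omega
      · have he : v = pivot := by omega
        simp only [List.filter_cons, h1, h2, he, decide_true, decide_false] at *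
        simp_all; omega

theorem choose_pivot_mem (values : List Int) (h : values ≠ []) :
    choose_pivot values ∈ values := by
  unfold choose_pivot
  have hlen : 0 < values.length := List.length_pos_iff.mpr h
  have hfd : PySem.Int.floordiv (values.length : Int) 2 = (values.length : Int) / 2 := by
    simp [PySem.Int.floordiv, Int.fdiv_eq_ediv]
  have hfirst : PySem.List.pyGetD values 0 0 ∈ values :=
    PySem.List.pyGetD_mem values 0 (by simp [PySem.Raise.InRange]; omega)
  have hmid : PySem.List.pyGetD values (PySem.Int.floordiv values.length 2) 0 ∈ values :=
    PySem.List.pyGetD_mem values 0 (by simp [PySem.Raise.InRange, hfd]; omega)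
  have hlast : PySem.List.pyGetD values (-1) 0 ∈ values :=
    PySem.List.pyGetD_mem values 0 (by simp [PySem.Raise.InRange]; omega)
  have htrio : PySem.List.pyGetD
      (PySem.List.sorted [PySem.List.pyGetD values 0 0,
        PySem.List.pyGetD values (PySem.Int.floordiv values.length 2) 0,
        PySem.List.pyGetD values (-1) 0] (fun x => x) false) 1 0 ∈
      PySem.List.sorted [PySem.List.pyGetD values 0 0,
        PySem.List.pyGetD values (PySem.Int.floordiv values.length 2) 0,
        PySem.List.pyGetD values (-1) 0] (fun x => x) false := by
    apply PySem.List.pyGetD_mem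
    rw [PySem.Raise.InRange, PySem.List.length_sorted]
    simp
  rw [PySem.List.mem_sorted] at htrio
  simp only [List.mem_cons, List.mem_singleton, List.not_mem_nil, or_false] at htrio
  rcases htrio with h1 | h1 | h1 <;> rw [h1]
  · exact hfirst
  · exact hmid
  · exact hlast

theorem part3_equal_ne_nil (values : List Int) (h : values ≠ []) :
    (partition_three_way values (choose_pivot values)).2.1 ≠ [] := by
  intro hnil
  have hmem : choose_pivot values ∈ (partition_three_way values (choose_pivot values)).2.1 := by
    rw [part3_spec]
    simp [List.mem_filter, choose_pivot_mem values h]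
  rw [hnil] at hmem
  cases hmem

-- _expand_partitions (port of A); the Python locals n/pivot/less/equal/greater are inlined
def expand_partitions_py (values : List Int) (depth : Int) (min_partition_size : Int) :
    List (List Int) :=
  if (values.length : Int) ≤ 1 then [values]
  else if depth ≤ 0 ∨ (values.length : Int) < min_partition_size then [values]
  else
    if ((partition_three_way values (choose_pivot values)).2.1.length : Int) = (values.length : Int) then
      [(partition_three_way values (choose_pivot values)).2.1]
    else
      (if (partition_three_way values (choose_pivot values)).1 ≠ [] then
        expand_partitions_py (partition_three_way values (choose_pivot values)).1 (depth - 1) min_partition_size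
      else []) ++
      (if (partition_three_way values (choose_pivot values)).2.1 ≠ [] then
        [(partition_three_way values (choose_pivot values)).2.1] else []) ++
      (if (partition_three_way values (choose_pivot values)).2.2 ≠ [] then
        expand_partitions_py (partition_three_way values (choose_pivot values)).2.2 (depth - 1) min_partition_size
      else [])
termination_by values.length
decreasing_by
  all_goals
    have hge : 2 ≤ values.length := by omega
    have hne : values ≠ [] := List.ne_nil_of_length_pos (by omega)
    have hl := part3_len values (choose_pivot values)
    have hpos : 0 < (partition_three_way values (choose_pivot values)).2.1.length :=
      List.length_pos_iff.mpr (part3_equal_ne_nil values hne)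
    omega

-- ===== PORT B =====
-- within(v, lo, hi): v lies in the open interval (lo, hi); None = unbounded
def pvWithin (lo hi : Option Int) (v : Int) : Bool :=
  (match lo with | none => true | some l => decide (l < v)) &&
  (match hi with | none => true | some h => decide (v < h))

-- narrowing an interval at a member p keeps strictly fewer elements (cited by pvGo's termination)
theorem pvNarrow_hi (values : List Int) (lo hi : Option Int) (p : Int)
    (hp : pvWithin lo hi p = true) :
    values.filter (pvWithin lo (some p)) =
      (values.filter (pvWithin lo hi)).filter (fun v => decide (v < p)) := by
  rw [List.filter_filter]
  apply List.filter_congr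
  intro a _
  cases lo <;> cases hi <;> rw [Bool.eq_iff_iff] <;> simp [pvWithin] at hp ⊢ <;> omega

theorem pvNarrow_lo (values : List Int) (lo hi : Option Int) (p : Int)
    (hp : pvWithin lo hi p = true) :
    values.filter (pvWithin (some p) hi) =
      (values.filter (pvWithin lo hi)).filter (fun v => decide (p < v)) := by
  rw [List.filter_filter]
  apply List.filter_congr
  intro a _
  cases lo <;> cases hi <;> rw [Bool.eq_iff_iff] <;> simp [pvWithin] at hp ⊢ <;> omega

theorem pvFilter_lt_of_mem_not {l : List Int} {q : Int → Bool} {x : Int}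
    (hx : x ∈ l) (hqx : q x = false) : (l.filter q).length < l.length := by
  induction l with
  | nil => cases hx
  | cons a t ih =>
    rcases List.mem_cons.mp hx with rfl | hx'
    · rw [List.filter_cons, hqx]
      simpa using Nat.lt_succ_of_le (List.length_filter_le q t)
    · rw [List.filter_cons]
      cases hqa : q a
      · simpa using Nat.lt_succ_of_lt (ih hx')
      · simpa using Nat.succ_lt_succ (ih hx')

theorem pvNarrow_hi_lt (values : List Int) (lo hi : Option Int) (p : Int)
    (hp : p ∈ values.filter (pvWithin lo hi)) :
    (values.filter (pvWithin lo (some p))).length <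
      (values.filter (pvWithin lo hi)).length := by
  have hin := (List.mem_filter.mp hp).2
  rw [pvNarrow_hi values lo hi p hin]
  exact pvFilter_lt_of_mem_not hp (by simp)

theorem pvNarrow_lo_lt (values : List Int) (lo hi : Option Int) (p : Int)
    (hp : p ∈ values.filter (pvWithin lo hi)) :
    (values.filter (pvWithin (some p) hi)).length <
      (values.filter (pvWithin lo hi)).length := by
  have hin := (List.mem_filter.mp hp).2
  rw [pvNarrow_lo values lo hi p hin]
  exact pvFilter_lt_of_mem_not hp (by simp)

-- the inner go(lo, hi, d) of Source B; the Python locals vs/n/pivot/equal are inlined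
def pvGo (values : List Int) (m : Int) (lo hi : Option Int) (d : Int) : List (List Int) :=
  if ((values.filter (pvWithin lo hi)).length : Int) ≤ 1 ∨ d ≤ 0 ∨
      ((values.filter (pvWithin lo hi)).length : Int) < m then
    [values.filter (pvWithin lo hi)]
  else
    if (((values.filter (pvWithin lo hi)).filter
          (fun v => decide (v = choose_pivot (values.filter (pvWithin lo hi))))).length : Int) =
        ((values.filter (pvWithin lo hi)).length : Int) then
      [(values.filter (pvWithin lo hi)).filter
        (fun v => decide (v = choose_pivot (values.filter (pvWithin lo hi))))]
    else
      (if (values.filter (pvWithin lo hi)).any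
            (fun v => decide (v < choose_pivot (values.filter (pvWithin lo hi)))) then
        pvGo values m lo (some (choose_pivot (values.filter (pvWithin lo hi)))) (d - 1)
      else []) ++
      [(values.filter (pvWithin lo hi)).filter
        (fun v => decide (v = choose_pivot (values.filter (pvWithin lo hi))))] ++
      (if (values.filter (pvWithin lo hi)).any
            (fun v => decide (choose_pivot (values.filter (pvWithin lo hi)) < v)) then
        pvGo values m (some (choose_pivot (values.filter (pvWithin lo hi)))) hi (d - 1)
      else [])
termination_by (values.filter (pvWithin lo hi)).length
decreasing_by
  all_goals simp only [List.filter_attach, List.unattach_attachWith, List.unattach,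
    List.map_map, Function.comp_def, Subtype.map, List.attach_map_val, List.map_id] at *
  · exact pvNarrow_hi_lt values lo hi _
      (choose_pivot_mem _ (List.ne_nil_of_length_pos (by omega)))
  · exact pvNarrow_lo_lt values lo hi _
      (choose_pivot_mem _ (List.ne_nil_of_length_pos (by omega)))

def expand_partitions_py_alt (values : List Int) (depth : Int) (min_partition_size : Int) :
    List (List Int) :=
  pvGo values min_partition_size none none depth

-- ===== PRECONDITION & SPEC =====
def Spec_expand_partitions_py (values : List Int) (depth : Int) (min_partition_size : Int) (out : List (List Int)) : Prop := out = expand_partitions_py_alt values depth min_partition_size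
instance (values : List Int) (depth : Int) (min_partition_size : Int) (out : List (List Int)) : Decidable (Spec_expand_partitions_py values depth min_partition_size out) := by unfold Spec_expand_partitions_py; infer_instance

-- ===== CLAIM (what is proved, stated in full; the proofs are below) =====
def Claim_equal_expand_partitions_py : Prop := ∀ (values : List Int) (depth : Int) (min_partition_size : Int), Dom_expand_partitions_py values depth min_partition_size → Spec_expand_partitions_py values depth min_partition_size (expand_partitions_py values depth min_partition_size)

-- ===== LEMMAS AND PROOFS =====

-- pvGo at interval (lo, hi) computes A's expansion of the filtered sublist
theorem pvGo_eq_A (m : Int) : ∀ (N : Nat) (values : List Int) (lo hi : Option Int) (d : Int),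
    (values.filter (pvWithin lo hi)).length ≤ N →
    pvGo values m lo hi d = expand_partitions_py (values.filter (pvWithin lo hi)) d m := by
  intro N
  induction N with
  | zero =>
    intro values lo hi d hN
    have hnil : values.filter (pvWithin lo hi) = [] :=
      List.length_eq_zero_iff.mp (Nat.le_zero.mp hN)
    rw [pvGo, expand_partitions_py]
    simp [hnil]
  | succ N ih =>
    intro values lo hi d hN
    set vs := values.filter (pvWithin lo hi) with hvs
    by_cases hleaf : (vs.length : Int) ≤ 1 ∨ d ≤ 0 ∨ (vs.length : Int) < m
    · rw [pvGo, expand_partitions_py]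
      simp only [← hvs, hleaf, if_true, ite_true]
      rcases hleaf with h1 | h2
      · simp [h1]
      · by_cases h1 : (vs.length : Int) ≤ 1 <;> simp [h1, h2]
    · push_neg at hleaf
      obtain ⟨h1, h2, h3⟩ := hleaf
      have hne : vs ≠ [] := List.ne_nil_of_length_pos (by omega)
      have hpmem : choose_pivot vs ∈ vs := choose_pivot_mem vs hne
      have hp3 := part3_spec vs (choose_pivot vs)
      have hc0 : ¬ ((vs.length : Int) ≤ 1 ∨ d ≤ 0 ∨ (vs.length : Int) < m) := by omega
      have hc1 : ¬ ((vs.length : Int) ≤ 1) := by omega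
      have hc2 : ¬ (d ≤ 0 ∨ (vs.length : Int) < m) := by omega
      rw [pvGo, expand_partitions_py]
      simp only [← hvs, hc0, hc1, hc2, if_false, ite_false, hp3]
      by_cases heqall :
          ((vs.filter (fun v => decide (v = choose_pivot vs))).length : Int) = (vs.length : Int)
      · simp [heqall]
      · simp only [heqall, if_false, ite_false]
        have hEq : vs.filter (fun v => decide (v = choose_pivot vs)) ≠ [] := by
          intro hnilE
          have : choose_pivot vs ∈ vs.filter (fun v => decide (v = choose_pivot vs)) := by
            simp [List.mem_filter, hpmem]
          rw [hnilE] at this; cases this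
        have hinW : pvWithin lo hi (choose_pivot vs) = true :=
          (List.mem_filter.mp (hvs ▸ hpmem)).2
        have hLn := pvNarrow_hi_lt values lo hi (choose_pivot vs) (hvs ▸ hpmem)
        have hGn := pvNarrow_lo_lt values lo hi (choose_pivot vs) (hvs ▸ hpmem)
        rw [← hvs] at hLn hGn
        have hLrw := pvNarrow_hi values lo hi (choose_pivot vs) hinW
        have hGrw := pvNarrow_lo values lo hi (choose_pivot vs) hinW
        have hAnyL : vs.any (fun v => decide (v < choose_pivot vs)) =
            !(vs.filter (fun v => decide (v < choose_pivot vs))).isEmpty := by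
          cases h : vs.any (fun v => decide (v < choose_pivot vs))
          · simp only [List.any_eq_false] at h
            have : vs.filter (fun v => decide (v < choose_pivot vs)) = [] := by
              apply List.filter_eq_nil_iff.mpr; intro a ha; exact h a ha
            simp [this]
          · simp only [List.any_eq_true] at h
            obtain ⟨a, ha, hpa⟩ := h
            have : a ∈ vs.filter (fun v => decide (v < choose_pivot vs)) :=
              List.mem_filter.mpr ⟨ha, hpa⟩
            simp [List.isEmpty_iff, List.ne_nil_of_mem this]
        have hAnyG : vs.any (fun v => decide (choose_pivot vs < v)) =
            !(vs.filter (fun v => decide (choose_pivot vs < v))).isEmpty := by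
          cases h : vs.any (fun v => decide (choose_pivot vs < v))
          · simp only [List.any_eq_false] at h
            have : vs.filter (fun v => decide (choose_pivot vs < v)) = [] := by
              apply List.filter_eq_nil_iff.mpr; intro a ha; exact h a ha
            simp [this]
          · simp only [List.any_eq_true] at h
            obtain ⟨a, ha, hpa⟩ := h
            have : a ∈ vs.filter (fun v => decide (choose_pivot vs < v)) :=
              List.mem_filter.mpr ⟨ha, hpa⟩
            simp [List.isEmpty_iff, List.ne_nil_of_mem this]
        have hLih : pvGo values m lo (some (choose_pivot vs)) (d - 1) =
            expand_partitions_py (vs.filter (fun v => decide (v < choose_pivot vs))) (d - 1) m := by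
          rw [ih values lo (some (choose_pivot vs)) (d - 1) (by omega), hLrw, ← hvs]
        have hGih : pvGo values m (some (choose_pivot vs)) hi (d - 1) =
            expand_partitions_py (vs.filter (fun v => decide (choose_pivot vs < v))) (d - 1) m := by
          rw [ih values (some (choose_pivot vs)) hi (d - 1) (by omega), hGrw, ← hvs]
        by_cases hL : vs.filter (fun v => decide (v < choose_pivot vs)) = [] <;>
          by_cases hG : vs.filter (fun v => decide (choose_pivot vs < v)) = [] <;>
            simp [hAnyL, hAnyG, hL, hG, hEq, hLih, hGih]

theorem pvWithin_none_none (values : List Int) :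
    values.filter (pvWithin none none) = values := by
  simp [pvWithin]

-- ===== VERDICT (by name: the statement is the Claim_ definition above) =====
theorem expand_partitions_py_spec : Claim_equal_expand_partitions_py := by
  intro values depth m _
  unfold Spec_expand_partitions_py expand_partitions_py_alt
  rw [pvGo_eq_A m (values.filter (pvWithin none none)).length values none none depth le_rfl,
    pvWithin_none_none]
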